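-- pv_equiv track=rewrite | github.com/LnC-Study/Acmicpc-net | __Samsung swexpert/3367 갤럭시 S9 공정개발/kmj_python.py | initialize_list
-- ===== SOURCE A (Python) =====
-- def cal_sum(parts, i, j):
--     total_sum = 0
--     for idx in range(i, j+1):
--         total_sum = total_sum + parts[idx]
--     return total_sum
--
-- def initialize_list(parts):
--     INF = 987654321
--     n = len(parts)
--     cost = list(list(0 for i in range(n)) for i in range(n))
--     for i in range(n):
--         for j in range(n):
--             if i == j:
--                 cost[i][j] = parts[i]
--             else:
--                 if j - i == 1:
--                     cost[i][j] = parts[i] + parts[j]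
--                 else:
--                     cost[i][j] = INF
--     sum = list(list(0 for i in range(n)) for i in range(n))
--     for i in range(n):
--         for j in range(i, n):
--             sum[i][j] = cal_sum(parts, i, j)
--
--     return cost, sum
-- ===== SOURCE B (Python) =====
-- def initialize_list(parts):
--     INF = 987654321
--     n = len(parts)
--     cost = [[parts[i] if i == j else (parts[i] + parts[j] if j - i == 1 else INF)
--              for j in range(n)] for i in range(n)]
--     pre = [0]
--     for x in parts:
--         pre.append(pre[-1] + x)
--     sum = [[pre[j + 1] - pre[i] if i <= j else 0 for j in range(n)] for i in range(n)]
--     return cost, sum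
-- ===== Notes on version B (the rewrite author's own statement) =====
-- stated objective: faster
-- what changed: cost is built directly by a comprehension and the O(n^3) per-cell cal_sum rescans are replaced by one prefix-sum array so each sum[i][j] is an O(1) difference pre[j+1]-pre[i].
import Mathlib
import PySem

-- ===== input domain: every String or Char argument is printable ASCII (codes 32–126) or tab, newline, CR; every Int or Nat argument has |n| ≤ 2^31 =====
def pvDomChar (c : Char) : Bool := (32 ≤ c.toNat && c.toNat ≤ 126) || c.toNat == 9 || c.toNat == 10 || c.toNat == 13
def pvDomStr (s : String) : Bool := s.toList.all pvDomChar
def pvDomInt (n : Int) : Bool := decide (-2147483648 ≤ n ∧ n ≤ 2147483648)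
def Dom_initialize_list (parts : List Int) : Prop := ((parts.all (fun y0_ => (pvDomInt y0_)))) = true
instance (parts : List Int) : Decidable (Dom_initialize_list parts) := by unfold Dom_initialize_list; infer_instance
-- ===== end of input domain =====

-- B replaces A's per-cell cal_sum rescans (O(n^3)) by one prefix-sum pass, filling each sum cell in O(1) (O(n^2) total).

-- ===== PORT A =====
-- Python `m[i][j] = v` on a list-of-lists (indices here are the in-range non-negative loop indices).
def pvSet2 (m : List (List Int)) (i j : Nat) (v : Int) : List (List Int) :=
  m.set i ((m.getD i []).set j v)

def cal_sum (parts : List Int) (i j : Int) : Int :=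
  (PySem.List.pyRange i (j+1) 1).foldl (fun total idx => total + PySem.List.pyGetD parts idx 0) 0

def initialize_list (parts : List Int) : List (List Int) × List (List Int) :=
  let INF : Int := 987654321
  let n : Int := parts.length
  let cost0 := (PySem.List.pyRange 0 n 1).map (fun _ => (PySem.List.pyRange 0 n 1).map (fun _ => (0:Int)))
  let cost := (PySem.List.pyRange 0 n 1).foldl (fun c i =>
      (PySem.List.pyRange 0 n 1).foldl (fun c j =>
        if i = j then pvSet2 c i.natAbs j.natAbs (PySem.List.pyGetD parts i 0)
        else if j - i = 1 then pvSet2 c i.natAbs j.natAbs (PySem.List.pyGetD parts i 0 + PySem.List.pyGetD parts j 0)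
        else pvSet2 c i.natAbs j.natAbs INF) c) cost0
  let sum0 := (PySem.List.pyRange 0 n 1).map (fun _ => (PySem.List.pyRange 0 n 1).map (fun _ => (0:Int)))
  let sum := (PySem.List.pyRange 0 n 1).foldl (fun s i =>
      (PySem.List.pyRange i n 1).foldl (fun s j =>
        pvSet2 s i.natAbs j.natAbs (cal_sum parts i j)) s) sum0
  (cost, sum)

-- ===== PORT B =====
def initialize_list_alt (parts : List Int) : List (List Int) × List (List Int) :=
  let INF : Int := 987654321
  let n : Int := parts.length
  let cost := (PySem.List.pyRange 0 n 1).map (fun i => (PySem.List.pyRange 0 n 1).map (fun j =>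
      if i = j then PySem.List.pyGetD parts i 0
      else if j - i = 1 then PySem.List.pyGetD parts i 0 + PySem.List.pyGetD parts j 0
      else INF))
  let pre := parts.foldl (fun pre x => pre ++ [PySem.List.pyGetD pre (-1) 0 + x]) [(0:Int)]
  let sum := (PySem.List.pyRange 0 n 1).map (fun i => (PySem.List.pyRange 0 n 1).map (fun j =>
      if i ≤ j then PySem.List.pyGetD pre (j+1) 0 - PySem.List.pyGetD pre i 0 else 0))
  (cost, sum)

-- ===== PRECONDITION & SPEC =====
def Spec_initialize_list (parts : List Int) (out : List (List Int) × List (List Int)) : Prop := out = initialize_list_alt parts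
instance (parts : List Int) (out : List (List Int) × List (List Int)) : Decidable (Spec_initialize_list parts out) := by unfold Spec_initialize_list; infer_instance

-- ===== CLAIM (what is proved, stated in full; the proofs are below) =====
def Claim_equal_initialize_list : Prop := ∀ (parts : List Int), Dom_initialize_list parts → Spec_initialize_list parts (initialize_list parts)

-- ===== LEMMAS AND PROOFS =====

lemma pv_getElem?_foldl_set (l : List Int) (f : Int → Int) (hnn : ∀ x ∈ l, 0 ≤ x)
    (m : List Int) (k : Nat) :
    (l.foldl (fun r j => r.set j.natAbs (f j)) m)[k]? =
      if ((k:Int) ∈ l ∧ k < m.length) then some (f (k:Int)) else m[k]? := by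
  induction l generalizing m with
  | nil => simp
  | cons j l ih =>
    have hj : (0:Int) ≤ j := hnn j (by simp)
    rw [List.foldl_cons, ih (fun x hx => hnn x (by simp [hx]))]
    simp only [List.length_set, List.getElem?_set, List.mem_cons]
    by_cases hk3 : k < m.length
    · by_cases hk1 : (k:Int) ∈ l
      · simp [hk1, hk3]
      · by_cases hk2 : j.natAbs = k
        · have hkj : (k:Int) = j := by omega
          simp [hk2, hk3, hkj]
        · have hkj : ¬ (k:Int) = j := by omega
          simp [hk1, hk2, hk3, hkj]
    · have hnone : m[k]? = none := List.getElem?_eq_none (by omega)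
      by_cases hk2 : j.natAbs = k
      · simp [hk3, hk2]
      · simp [hk3, hk2]

lemma pv_foldl_pvSet2_row (l : List Int) (i : Nat) (v : Int → Int) (c : List (List Int)) :
    l.foldl (fun c j => pvSet2 c i j.natAbs (v j)) c
      = c.set i (l.foldl (fun r j => r.set j.natAbs (v j)) (c.getD i [])) := by
  induction l generalizing c with
  | nil =>
    by_cases h : i < c.length
    · simp [List.getD, List.getElem?_eq_getElem h, List.set_getElem_self]
    · show c = c.set i (c.getD i [])
      exact (List.set_eq_of_length_le (by omega)).symm
  | cons j l ih =>
    rw [List.foldl_cons, ih]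
    by_cases h : i < c.length
    · simp [pvSet2, List.set_set, List.getD_eq_getElem?_getD, List.getElem?_set_self h]
    · have hle : c.length ≤ i := by omega
      have h1 : ∀ r : List Int, c.set i r = c := fun r => List.set_eq_of_length_le hle
      have h2 : (pvSet2 c i j.natAbs (v j)) = c := by
        simp [pvSet2, h1]
      rw [h2]
      simp [List.getD_eq_getElem?_getD, List.getElem?_eq_none hle]

lemma pv_getElem?_foldl_setrow (l : List Int) (hnn : ∀ x ∈ l, 0 ≤ x) (hnd : l.Nodup)
    (F : Int → List Int → List Int) (m : List (List Int)) (k : Nat) :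
    (l.foldl (fun c i => c.set i.natAbs (F i (c.getD i.natAbs []))) m)[k]? =
      if ((k:Int) ∈ l ∧ k < m.length) then some (F (k:Int) (m.getD k [])) else m[k]? := by
  induction l generalizing m with
  | nil => simp
  | cons i l ih =>
    have hi : (0:Int) ≤ i := hnn i (by simp)
    have hnd' : l.Nodup := hnd.of_cons
    have hni : i ∉ l := by simp at hnd; exact hnd.1
    rw [List.foldl_cons, ih (fun x hx => hnn x (by simp [hx])) hnd']
    simp only [List.length_set, List.mem_cons]
    by_cases hk1 : (k:Int) ∈ l
    · have hki : ¬ (k:Int) = i := fun h => hni (h ▸ hk1)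
      have hkn : ¬ i.natAbs = k := by omega
      by_cases hk2 : k < m.length
      · simp [hk1, hk2, List.getD_eq_getElem?_getD, List.getElem_set_ne hkn]
      · simp [hk1, hk2]
    · by_cases hk2 : i.natAbs = k
      · have hik : (k:Int) = i := by omega
        subst hk2
        by_cases hk3 : i.natAbs < m.length
        · simp [hik, hni, hk3, List.getD_eq_getElem?_getD]
        · simp [hik, hk3]
      · have : ¬ (k:Int) = i := by omega
        simp [hk1, this, List.getElem?_set_ne hk2]

-- prefix list of B equals the list of partial sums
lemma pv_pre_eq (parts : List Int) :
    parts.foldl (fun pre x => pre ++ [PySem.List.pyGetD pre (-1) 0 + x]) [(0:Int)]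
      = (List.range (parts.length + 1)).map (fun k => ((parts.take k).sum)) := by
  induction parts using List.reverseRecOn with
  | nil => simp
  | append_singleton l x ih =>
    rw [List.foldl_append, List.foldl_cons, List.foldl_nil, ih]
    have hlast2 : PySem.List.pyGetD ((List.range (l.length + 1)).map (fun k => ((l.take k).sum))) (-1) 0
        = l.sum := by
      simp [PySem.List.pyGetD, PySem.List.pyGet?, PySem.List.pyIdx?, List.range_succ]
    rw [hlast2]
    have hlen2 : (l ++ [x]).length + 1 = (l.length + 1) + 1 := by simp
    rw [hlen2]
    conv_rhs => rw [List.range_succ, List.map_append]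
    congr 1
    · apply List.map_congr_left
      intro k hk
      simp only [List.mem_range] at hk
      rw [List.take_append_of_le_length (by omega)]
    · simp

lemma pv_cal_sum_eq (parts : List Int) (i j : Int) (h0 : 0 ≤ i) (hij : i ≤ j)
    (hj : j < (parts.length : Int)) :
    cal_sum parts i j = ((parts.take (j+1).toNat).sum) - ((parts.take i.toNat).sum) := by
  unfold cal_sum
  have hlen : ((parts.take (j+1).toNat).length : Int) = j + 1 := by
    simp; omega
  have hstep : ∀ idx ∈ PySem.List.pyRange i (j+1) 1,
      PySem.List.pyGetD parts idx 0 = PySem.List.pyGetD (parts.take (j+1).toNat) idx 0 := by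
    intro idx hidx
    rw [PySem.List.mem_pyRange_one] at hidx
    have h0i : 0 ≤ idx := by omega
    rw [PySem.List.pyGetD_of_nonneg _ _ h0i, PySem.List.pyGetD_of_nonneg _ _ h0i]
    rw [List.getD_eq_getElem?_getD, List.getD_eq_getElem?_getD]
    rw [List.getElem?_take]
    have : idx.toNat < (j+1).toNat := by omega
    simp [this]
  rw [PySem.List.foldl_congr_mem _ _
      (fun total idx => total + PySem.List.pyGetD (parts.take (j+1).toNat) idx 0) _
      (fun acc idx hidx => by rw [hstep idx hidx])]
  rw [show PySem.List.pyRange i (j+1) 1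
      = PySem.List.pyRange i (PySem.List.len (parts.take (j+1).toNat)) 1 by
    congr 1
    simpa [PySem.List.len] using hlen.symm]
  rw [PySem.List.foldl_pyRange_pyGetD _ _ _ _ h0]
  have := List.take_append_drop i.toNat (parts.take (j+1).toNat)
  have hsum : (parts.take (j+1).toNat).sum
      = ((parts.take (j+1).toNat).take i.toNat).sum + (((parts.take (j+1).toNat).drop i.toNat)).sum := by
    conv_lhs => rw [← this]
    rw [List.sum_append]
  rw [List.take_take] at hsum
  have hmin : min i.toNat (j+1).toNat = i.toNat := by omega
  rw [hmin] at hsum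
  have hfold : ((parts.take (j+1).toNat).drop i.toNat).foldl (fun acc x => acc + x) 0
      = ((parts.take (j+1).toNat).drop i.toNat).sum := by
    rw [← List.sum_eq_foldl]
  rw [hfold]
  omega

-- value written into cost[i][j] by A's branches (proof-only helper)
def pvCostVal (parts : List Int) (i j : Int) : Int :=
  if i = j then PySem.List.pyGetD parts i 0
  else if j - i = 1 then PySem.List.pyGetD parts i 0 + PySem.List.pyGetD parts j 0
  else 987654321

lemma pv_getD_map_range_sum (parts : List Int) (t : Nat) (ht : t ≤ parts.length) :
    PySem.List.pyGetD ((List.range (parts.length + 1)).map (fun k => ((parts.take k).sum))) (t : Int) 0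
      = (parts.take t).sum := by
  rw [PySem.List.pyGetD_of_nonneg _ _ (by omega)]
  rw [List.getD_eq_getElem?_getD, List.getElem?_map, List.getElem?_range (by omega)]
  simp

lemma pv_cost_component (parts : List Int) :
    (PySem.List.pyRange 0 (parts.length : Int) 1).foldl (fun c i =>
      (PySem.List.pyRange 0 (parts.length : Int) 1).foldl (fun c j =>
        if i = j then pvSet2 c i.natAbs j.natAbs (PySem.List.pyGetD parts i 0)
        else if j - i = 1 then pvSet2 c i.natAbs j.natAbs (PySem.List.pyGetD parts i 0 + PySem.List.pyGetD parts j 0)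
        else pvSet2 c i.natAbs j.natAbs 987654321) c)
      ((PySem.List.pyRange 0 (parts.length : Int) 1).map (fun _ => (PySem.List.pyRange 0 (parts.length : Int) 1).map (fun _ => (0:Int))))
    = (PySem.List.pyRange 0 (parts.length : Int) 1).map (fun i => (PySem.List.pyRange 0 (parts.length : Int) 1).map (fun j => pvCostVal parts i j)) := by
  set N := parts.length with hN
  have hrow : ∀ (c : List (List Int)) (i : Int),
      (PySem.List.pyRange 0 (N : Int) 1).foldl (fun c j =>
        if i = j then pvSet2 c i.natAbs j.natAbs (PySem.List.pyGetD parts i 0)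
        else if j - i = 1 then pvSet2 c i.natAbs j.natAbs (PySem.List.pyGetD parts i 0 + PySem.List.pyGetD parts j 0)
        else pvSet2 c i.natAbs j.natAbs 987654321) c
      = c.set i.natAbs ((PySem.List.pyRange 0 (N : Int) 1).foldl
          (fun r j => r.set j.natAbs (pvCostVal parts i j)) (c.getD i.natAbs [])) := by
    intro c i
    rw [← pv_foldl_pvSet2_row]
    apply PySem.List.foldl_congr_mem
    intro acc x _
    unfold pvCostVal pvSet2
    split_ifs <;> rfl
  rw [PySem.List.foldl_congr_mem _ _
      (fun c i => c.set i.natAbs (((PySem.List.pyRange 0 (N : Int) 1).foldl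
        (fun r j => r.set j.natAbs (pvCostVal parts i j))) (c.getD i.natAbs []))) _
      (fun c i _ => hrow c i)]
  beta_reduce
  have hzlen : ((PySem.List.pyRange 0 (N : Int) 1).map (fun _ => (PySem.List.pyRange 0 (N : Int) 1).map (fun _ => (0:Int)))).length = N := by
    simp [PySem.List.length_pyRange_one]
  apply List.ext_getElem?
  intro k
  rw [pv_getElem?_foldl_setrow _
      (fun x hx => (PySem.List.mem_pyRange_one.mp hx).1) (PySem.List.nodup_pyRange_one _ _)
      (fun i r => List.foldl (fun r j => r.set j.natAbs (pvCostVal parts i j)) r (PySem.List.pyRange 0 (N : Int) 1))]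
  rw [hzlen]
  by_cases hk : k < N
  · rw [if_pos ⟨PySem.List.mem_pyRange_one.mpr (by omega), hk⟩,
      PySem.List.getElem?_map_pyRange_zero _ _ _ hk]
    congr 1
    have hz : ((PySem.List.pyRange 0 (N : Int) 1).map (fun _ => (PySem.List.pyRange 0 (N : Int) 1).map (fun _ => (0:Int)))).getD k []
        = (PySem.List.pyRange 0 (N : Int) 1).map (fun _ => (0:Int)) := by
      rw [List.getD_eq_getElem?_getD, List.getElem?_map,
        PySem.List.getElem?_pyRange_one 0 (N : Int) k, if_pos (by omega)]
      rfl
    rw [hz]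
    apply List.ext_getElem?
    intro k2
    rw [pv_getElem?_foldl_set _ _ (fun x hx => (PySem.List.mem_pyRange_one.mp hx).1)]
    by_cases hk2 : k2 < N
    · rw [if_pos ⟨PySem.List.mem_pyRange_one.mpr (by omega), by simpa [PySem.List.length_pyRange_one] using hk2⟩,
        PySem.List.getElem?_map_pyRange_zero _ _ _ hk2]
    · rw [if_neg (by
        rintro ⟨h1, -⟩
        exact hk2 (by exact_mod_cast (PySem.List.mem_pyRange_one.mp h1).2))]
      rw [List.getElem?_eq_none (by simpa [PySem.List.length_pyRange_one] using hk2),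
        List.getElem?_eq_none (by simpa [PySem.List.length_pyRange_one] using hk2)]
  · rw [if_neg (by rintro ⟨-, h2⟩; omega)]
    rw [List.getElem?_eq_none (by simpa [PySem.List.length_pyRange_one] using hk),
      List.getElem?_eq_none (by simpa [PySem.List.length_pyRange_one] using hk)]

lemma pv_sum_component (parts : List Int) :
    (PySem.List.pyRange 0 (parts.length : Int) 1).foldl (fun s i =>
      (PySem.List.pyRange i (parts.length : Int) 1).foldl (fun s j =>
        pvSet2 s i.natAbs j.natAbs (cal_sum parts i j)) s)
      ((PySem.List.pyRange 0 (parts.length : Int) 1).map (fun _ => (PySem.List.pyRange 0 (parts.length : Int) 1).map (fun _ => (0:Int))))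
    = (PySem.List.pyRange 0 (parts.length : Int) 1).map (fun i => (PySem.List.pyRange 0 (parts.length : Int) 1).map (fun j =>
        if i ≤ j then PySem.List.pyGetD ((List.range (parts.length + 1)).map (fun k => ((parts.take k).sum))) (j+1) 0
            - PySem.List.pyGetD ((List.range (parts.length + 1)).map (fun k => ((parts.take k).sum))) i 0
        else 0)) := by
  set N := parts.length with hN
  rw [PySem.List.foldl_congr_mem _ _
      (fun s i => s.set i.natAbs (((PySem.List.pyRange i (N : Int) 1).foldl
        (fun r j => r.set j.natAbs (cal_sum parts i j))) (s.getD i.natAbs []))) _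
      (fun s i _ => pv_foldl_pvSet2_row _ _ _ _)]
  beta_reduce
  have hzlen : ((PySem.List.pyRange 0 (N : Int) 1).map (fun _ => (PySem.List.pyRange 0 (N : Int) 1).map (fun _ => (0:Int)))).length = N := by
    simp [PySem.List.length_pyRange_one]
  apply List.ext_getElem?
  intro k
  rw [pv_getElem?_foldl_setrow _
      (fun x hx => (PySem.List.mem_pyRange_one.mp hx).1) (PySem.List.nodup_pyRange_one _ _)
      (fun i r => List.foldl (fun r j => r.set j.natAbs (cal_sum parts i j)) r (PySem.List.pyRange i (N : Int) 1))]
  rw [hzlen]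
  by_cases hk : k < N
  · rw [if_pos ⟨PySem.List.mem_pyRange_one.mpr (by omega), hk⟩,
      PySem.List.getElem?_map_pyRange_zero _ _ _ hk]
    congr 1
    have hz : ((PySem.List.pyRange 0 (N : Int) 1).map (fun _ => (PySem.List.pyRange 0 (N : Int) 1).map (fun _ => (0:Int)))).getD k []
        = (PySem.List.pyRange 0 (N : Int) 1).map (fun _ => (0:Int)) := by
      rw [List.getD_eq_getElem?_getD, List.getElem?_map,
        PySem.List.getElem?_pyRange_one 0 (N : Int) k, if_pos (by omega)]
      rfl
    rw [hz]
    apply List.ext_getElem?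
    intro k2
    rw [pv_getElem?_foldl_set _ _
      (fun x hx => le_trans (by omega : (0:Int) ≤ (k : Int)) (PySem.List.mem_pyRange_one.mp hx).1)]
    by_cases hk2 : k2 < N
    · by_cases hkk : k ≤ k2
      · rw [if_pos ⟨PySem.List.mem_pyRange_one.mpr (by omega), by simpa [PySem.List.length_pyRange_one] using hk2⟩]
        rw [PySem.List.getElem?_map_pyRange_zero _ _ _ hk2]
        rw [if_pos (by exact_mod_cast hkk)]
        have hcal := pv_cal_sum_eq parts (k : Int) (k2 : Int) (by omega) (by exact_mod_cast hkk) (by exact_mod_cast hk2)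
        rw [hcal]
        have h1 : ((k2 : Int) + 1) = ((k2 + 1 : Nat) : Int) := by push_cast; ring
        rw [h1, pv_getD_map_range_sum parts (k2+1) (by omega), pv_getD_map_range_sum parts k (by omega)]
        congr 2
      · rw [if_neg (by
          rintro ⟨h1, -⟩
          exact hkk (by exact_mod_cast (PySem.List.mem_pyRange_one.mp h1).1))]
        rw [PySem.List.getElem?_map_pyRange_zero (fun _ => (0:Int)) _ _ hk2]
        rw [PySem.List.getElem?_map_pyRange_zero _ _ _ hk2]
        rw [if_neg (by exact_mod_cast hkk)]
    · rw [if_neg (by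
        rintro ⟨h1, -⟩
        exact hk2 (by exact_mod_cast (PySem.List.mem_pyRange_one.mp h1).2))]
      rw [List.getElem?_eq_none (by simpa [PySem.List.length_pyRange_one] using hk2),
        List.getElem?_eq_none (by simpa [PySem.List.length_pyRange_one] using hk2)]
  · rw [if_neg (by rintro ⟨-, h2⟩; omega)]
    rw [List.getElem?_eq_none (by simpa [PySem.List.length_pyRange_one] using hk),
      List.getElem?_eq_none (by simpa [PySem.List.length_pyRange_one] using hk)]

lemma pv_main (parts : List Int) : initialize_list parts = initialize_list_alt parts := by
  unfold initialize_list initialize_list_alt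
  rw [Prod.mk.injEq]
  constructor
  · exact pv_cost_component parts
  · rw [pv_pre_eq parts]
    exact pv_sum_component parts

-- ===== VERDICT (by name: the statement is the Claim_ definition above) =====
theorem initialize_list_spec : Claim_equal_initialize_list := by
  intro parts _
  unfold Spec_initialize_list
  exact pv_main parts
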